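-- pv_equiv track=rewrite | github.com/SY97P/Daily_Algo_Exercise | daily_algo/프로그래머스/lv3/자물쇠와_열쇠.py | solution
-- ===== SOURCE A (Python) =====
-- def get_lock(lock, n):
--     new_lock = [[0] * 3 * n for _ in range(3 * n)]
--     for i in range(n):
--         for j in range(n):
--             new_lock[i + n][j + n] = lock[i][j]
--     return new_lock
--
-- def rollback(x, y, lock, key, n, m):
--     for i in range(m):
--         for j in range(m):
--             lock[x + i][y + j] -= key[i][j]
--
-- def unlocking(x, y, lock, key, n, m):
--     for i in range(m):
--         for j in range(m):
--             lock[x + i][y + j] += key[i][j]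
--     for i in range(n):
--         for j in range(n):
--             if lock[n + i][n + j] != 1:
--                 rollback(x, y, lock, key, n, m)
--                 return False
--     rollback(x, y, lock, key, n, m)
--     return True
--
-- def rotate_key(key):
--     return list(zip(*key[::-1]))
--
-- def solution(key, lock):
--     n, m = len(lock), len(key)
--     lock = get_lock(lock, n)
--
--     for i in range(2 * n):
--         for j in range(2 * n):
--             for _ in range(4):
--                 key = rotate_key(key)
--                 if unlocking(i, j, lock, key, n, m):
--                     return True
--
--     return False
-- ===== SOURCE B (Python) =====
-- def solution(key, lock):
--     n, m = len(lock), len(key)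
--     r1 = [list(t) for t in zip(*key[::-1])]
--     r2 = [list(t) for t in zip(*r1[::-1])]
--     r3 = [list(t) for t in zip(*r2[::-1])]
--     r4 = [list(t) for t in zip(*r3[::-1])]
--     cells = [(a, b) for a in range(n) for b in range(n)]
--     for r in (r1, r2, r3, r4):
--         # constraint propagation: start from all offsets, shrink by one cell at a time
--         cand = [(i, j) for i in range(2 * n) for j in range(2 * n)]
--         for a, b in cells:
--             cand = [(i, j) for (i, j) in cand
--                     if lock[a][b]
--                        + (r[a + n - i][b + n - j]
--                           if 0 <= a + n - i < m and 0 <= b + n - j < m else 0)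
--                        == 1]
--             if not cand:
--                 break
--         if cand:
--             return True
--     return False
-- ===== Notes on version B (the rewrite author's own statement) =====
-- stated objective: faster
-- what changed: Replaces A's offset-by-offset simulation (padded 3n x 3n grid, add/check/rollback mutation per placement) by constraint propagation: for each of the four precomputed rotations B keeps a shrinking candidate-offset set and filters it cell by cell of the lock interior, stopping when it empties; success = a candidate survives all cells.
-- outside the precondition, e.g. on solution([[1, 1, 1], [1, 1, 1], [1, 1, 1]], [[0]]): A returns True, B returns True; on solution([[1, 1, 1], [1, 1, 1], [1, 1, 1]], [[1]]): A raises IndexError, B returns False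
import Mathlib
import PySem

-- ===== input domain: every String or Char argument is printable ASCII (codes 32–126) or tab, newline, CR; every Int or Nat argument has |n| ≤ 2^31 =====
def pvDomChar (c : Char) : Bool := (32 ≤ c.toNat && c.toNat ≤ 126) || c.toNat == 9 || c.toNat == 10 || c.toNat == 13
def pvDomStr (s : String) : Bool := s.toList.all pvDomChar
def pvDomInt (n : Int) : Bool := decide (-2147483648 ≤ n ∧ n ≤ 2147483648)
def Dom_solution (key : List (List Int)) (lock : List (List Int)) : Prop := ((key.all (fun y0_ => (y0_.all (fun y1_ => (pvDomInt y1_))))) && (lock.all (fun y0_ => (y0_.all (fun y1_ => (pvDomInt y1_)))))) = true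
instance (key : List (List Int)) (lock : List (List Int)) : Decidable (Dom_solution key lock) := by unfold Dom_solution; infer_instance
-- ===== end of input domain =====

-- B replaces A's per-offset simulation (padded grid, add/check/rollback) by constraint
-- propagation: a candidate-offset set filtered cell by cell of the lock interior.
-- Equal return value proved on Pre_ (A's non-raising domain); no argument is mutated.

-- shared low-level cell access (total proxies for Python indexing; exact inside Pre_)
def getCell (g : List (List Int)) (i j : Nat) : Int := (g.getD i []).getD j 0
def setCell (g : List (List Int)) (i j : Nat) (v : Int) : List (List Int) :=
  g.set i ((g.getD i []).set j v)

-- zip(*rows): truncating transpose, exactly Python's zip over the rows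
def transposeZip (rows : List (List Int)) : List (List Int) :=
  if h : (rows.isEmpty || rows.any (·.isEmpty)) = true then []
  else (rows.map (·.headD 0)) :: transposeZip (rows.map (·.tail))
termination_by (rows.headD []).length
decreasing_by
  simp only [Bool.or_eq_true, List.isEmpty_iff, List.any_eq_true, not_or] at h
  cases rows with
  | nil => exact absurd rfl h.1
  | cons r rest =>
    simp only [List.headD_cons]
    cases r with
    | nil => exact absurd (by exact ⟨[], by simp⟩) h.2
    | cons c cs => simp

-- list(zip(*key[::-1]))
def rotateK (key : List (List Int)) : List (List Int) := transposeZip key.reverse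

-- ===== PORT A =====
def getLockA (lock : List (List Int)) (n : Nat) : List (List Int) :=
  (List.range n).foldl (fun g i =>
    (List.range n).foldl (fun g j => setCell g (i + n) (j + n) (getCell lock i j)) g)
    (List.replicate (3 * n) (List.replicate (3 * n) (0 : Int)))

-- lock[x+i][y+j] += key[i][j]
def addA (x y : Nat) (g key : List (List Int)) (m : Nat) : List (List Int) :=
  (List.range m).foldl (fun g i =>
    (List.range m).foldl (fun g j =>
      setCell g (x + i) (y + j) (getCell g (x + i) (y + j) + getCell key i j)) g) g

-- rollback: lock[x+i][y+j] -= key[i][j]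
def rollA (x y : Nat) (g key : List (List Int)) (m : Nat) : List (List Int) :=
  (List.range m).foldl (fun g i =>
    (List.range m).foldl (fun g j =>
      setCell g (x + i) (y + j) (getCell g (x + i) (y + j) - getCell key i j)) g) g

def unlockingA (x y : Nat) (g key : List (List Int)) (n m : Nat) :
    List (List Int) × Bool :=
  let g1 := addA x y g key m
  let ok := (List.range n).all fun i =>
    (List.range n).all fun j => getCell g1 (n + i) (n + j) == 1
  (rollA x y g1 key m, ok)

-- 'for _ in range(4): key = rotate_key(key); if unlocking(...): return True'
def rotLoop (fuel x y : Nat) (g key : List (List Int)) (n m : Nat) :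
    List (List Int) × List (List Int) × Bool :=
  match fuel with
  | 0 => (g, key, false)
  | fuel + 1 =>
    let key' := rotateK key
    let r := unlockingA x y g key' n m
    if r.2 then (r.1, key', true) else rotLoop fuel x y r.1 key' n m

-- the nested 'for i / for j' offset loops, threading the mutated grid and key
def mainLoopA (offs : List (Nat × Nat)) (g key : List (List Int)) (n m : Nat) : Bool :=
  match offs with
  | [] => false
  | (x, y) :: rest =>
    let r := rotLoop 4 x y g key n m
    if r.2.2 then true else mainLoopA rest r.1 r.2.1 n m

def offsetsA (n : Nat) : List (Nat × Nat) :=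
  (List.range (2 * n)).flatMap fun i => (List.range (2 * n)).map fun j => (i, j)

def solution (key : List (List Int)) (lock : List (List Int)) : Bool :=
  let n := lock.length
  let m := key.length
  mainLoopA (offsetsA n) (getLockA lock n) key n m

-- ===== PORT B =====
-- one constraint: cell (a,b) of the lock interior sums to 1 under offset (i,j)
def cellOk (lock r : List (List Int)) (n m i j a b : Nat) : Bool :=
  getCell lock a b +
    (if i ≤ a + n ∧ a + n - i < m ∧ j ≤ b + n ∧ b + n - j < m then
      getCell r (a + n - i) (b + n - j) else 0) == 1

def cellsB (n : Nat) : List (Nat × Nat) :=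
  (List.range n).flatMap fun a => (List.range n).map fun b => (a, b)

-- shrink the candidate-offset set by one cell's constraint at a time; stop when empty
def candLoop (lock r : List (List Int)) (n m : Nat) :
    List (Nat × Nat) → List (Nat × Nat) → List (Nat × Nat)
  | [], cand => cand
  | c :: cs, cand =>
    let cand' := cand.filter fun p => cellOk lock r n m p.1 p.2 c.1 c.2
    if cand'.isEmpty then cand' else candLoop lock r n m cs cand'

def solution_alt (key : List (List Int)) (lock : List (List Int)) : Bool :=
  let n := lock.length
  let m := key.length
  let r1 := rotateK key
  let r2 := rotateK r1
  let r3 := rotateK r2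
  let r4 := rotateK r3
  [r1, r2, r3, r4].any fun r =>
    !(candLoop lock r n m (cellsB n)
        ((List.range (2 * n)).flatMap fun i =>
          (List.range (2 * n)).map fun j => (i, j))).isEmpty

-- ===== PRECONDITION & SPEC =====
-- Pre_ excludes exactly the inputs where Python A raises IndexError: a lock row shorter
-- than n, a key row shorter than m (the rotated key then has too few rows), or a key
-- wider than n+1 (writes past the fixed 3n×3n grid) — on the last kind A can still
-- return True when an early placement succeeds before the out-of-range write.
def Pre_solution (key : List (List Int)) (lock : List (List Int)) : Prop :=
  lock.length = 0 ∨
    ((∀ r ∈ lock, lock.length ≤ r.length) ∧ (∀ r ∈ key, key.length ≤ r.length) ∧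
      key.length ≤ lock.length + 1)
instance (key : List (List Int)) (lock : List (List Int)) : Decidable (Pre_solution key lock) := by
  unfold Pre_solution; infer_instance

def pvWitness_solution : List (List Int) × List (List Int) := ([[1]], [[0]])

def Spec_solution (key : List (List Int)) (lock : List (List Int)) (out : Bool) : Prop := out = solution_alt key lock
instance (key : List (List Int)) (lock : List (List Int)) (out : Bool) : Decidable (Spec_solution key lock out) := by unfold Spec_solution; infer_instance

-- ===== CLAIM (what is proved, stated in full; the proofs are below) =====
def Claim_equal_solution : Prop := ∀ (key : List (List Int)) (lock : List (List Int)), Dom_solution key lock → Pre_solution key lock → Spec_solution key lock (solution key lock)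

-- ===== LEMMAS AND PROOFS =====

-- a whole placement check, as used to characterise A's unlocking
def chk (lock r : List (List Int)) (n m i j : Nat) : Bool :=
  (List.range n).all fun a => (List.range n).all fun b => cellOk lock r n m i j a b

-- square shape of a grid
def Shaped (g : List (List Int)) (N : Nat) : Prop :=
  g.length = N ∧ ∀ a, a < N → (g.getD a []).length = N

theorem shaped_setCell {g : List (List Int)} {N : Nat} (hg : Shaped g N) (i j : Nat) (v : Int) :
    Shaped (setCell g i j v) N := by
  refine ⟨by simpa [setCell] using hg.1, fun a ha => ?_⟩
  unfold setCell
  rw [List.getD_eq_getElem?_getD]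
  by_cases hai : a = i
  · subst hai
    by_cases hlt : a < g.length
    · rw [List.getElem?_set_self hlt]
      simpa using hg.2 a ha
    · rw [List.set_eq_of_length_le (by omega)]
      rw [← List.getD_eq_getElem?_getD]
      exact hg.2 a ha
  · rw [List.getElem?_set_ne (fun h => hai h.symm)]
    rw [← List.getD_eq_getElem?_getD]
    exact hg.2 a ha

theorem getCell_setCell {g : List (List Int)} {N : Nat} (hg : Shaped g N)
    {a b : Nat} (ha : a < N) (hb : b < N) (i j : Nat) (v : Int) :
    getCell (setCell g i j v) a b = if a = i ∧ b = j then v else getCell g a b := by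
  unfold getCell setCell
  by_cases hai : a = i
  · subst hai
    have hlt : a < g.length := by rw [hg.1]; exact ha
    have h1 : (g.set a ((g.getD a []).set j v)).getD a [] = (g.getD a []).set j v := by
      rw [List.getD_eq_getElem?_getD, List.getElem?_set_self hlt]; simp
    rw [h1]
    by_cases hbj : b = j
    · subst hbj
      have hrow : b < (g.getD a []).length := by rw [hg.2 a ha]; exact hb
      rw [List.getD_eq_getElem?_getD, List.getElem?_set_self hrow]
      simp
    · rw [List.getD_eq_getElem?_getD, List.getElem?_set_ne (fun h => hbj h.symm),
        ← List.getD_eq_getElem?_getD]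
      simp [hbj]
  · have h1 : (g.set i ((g.getD i []).set j v)).getD a [] = g.getD a [] := by
      rw [List.getD_eq_getElem?_getD, List.getElem?_set_ne (fun h => hai h.symm),
        ← List.getD_eq_getElem?_getD]
    rw [h1]
    simp [hai]

-- generic in-place block update: the common shape of getLockA / addA / rollA
def updRow (g : List (List Int)) (r y C : Nat) (f : Nat → Int → Int) : List (List Int) :=
  (List.range C).foldl (fun g j => setCell g r (y + j) (f j (getCell g r (y + j)))) g

def updBlock (g : List (List Int)) (x y R C : Nat) (u : Nat → Nat → Int → Int) :
    List (List Int) :=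
  (List.range R).foldl (fun g i => updRow g (x + i) y C (u i)) g

theorem updRow_char {N : Nat} (f : Nat → Int → Int) :
    ∀ (C : Nat) (g : List (List Int)) (r y : Nat), Shaped g N →
      Shaped (updRow g r y C f) N ∧
      ∀ a b, a < N → b < N →
        getCell (updRow g r y C f) a b =
          if a = r ∧ y ≤ b ∧ b - y < C then f (b - y) (getCell g a b) else getCell g a b := by
  intro C
  induction C with
  | zero =>
    intro g r y hg
    refine ⟨by simpa [updRow] using hg, fun a b ha hb => ?_⟩
    simp only [updRow, List.range_zero, List.foldl_nil]
    split_ifs with h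
    · omega
    · rfl
  | succ C ih =>
    intro g r y hg
    have hstep : updRow g r y (C + 1) f =
        setCell (updRow g r y C f) r (y + C)
          (f C (getCell (updRow g r y C f) r (y + C))) := by
      unfold updRow
      rw [List.range_succ, List.foldl_append, List.foldl_cons, List.foldl_nil]
    obtain ⟨hsh, hch⟩ := ih g r y hg
    constructor
    · rw [hstep]; exact shaped_setCell hsh _ _ _
    · intro a b ha hb
      rw [hstep, getCell_setCell hsh ha hb]
      by_cases hhit : a = r ∧ b = y + C
      · obtain ⟨h1, h2⟩ := hhit
        subst h1; subst h2
        rw [if_pos ⟨rfl, rfl⟩, if_pos (by omega)]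
        have : getCell (updRow g a y C f) a (y + C) = getCell g a (y + C) := by
          rw [hch a (y + C) ha hb]
          rw [if_neg (by omega)]
        rw [this]
        congr 1
        omega
      · rw [if_neg hhit, hch a b ha hb]
        by_cases hc : a = r ∧ y ≤ b ∧ b - y < C
        · rw [if_pos hc, if_pos ⟨hc.1, hc.2.1, by omega⟩]
        · rw [if_neg hc, if_neg (by omega)]

theorem updBlock_char {N : Nat} (u : Nat → Nat → Int → Int) :
    ∀ (R : Nat) (g : List (List Int)) (x y C : Nat), Shaped g N →
      Shaped (updBlock g x y R C u) N ∧
      ∀ a b, a < N → b < N →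
        getCell (updBlock g x y R C u) a b =
          if x ≤ a ∧ a - x < R ∧ y ≤ b ∧ b - y < C then
            u (a - x) (b - y) (getCell g a b)
          else getCell g a b := by
  intro R
  induction R with
  | zero =>
    intro g x y C hg
    refine ⟨by simpa [updBlock] using hg, fun a b ha hb => ?_⟩
    simp only [updBlock, List.range_zero, List.foldl_nil]
    split_ifs with h
    · omega
    · rfl
  | succ R ih =>
    intro g x y C hg
    have hstep : updBlock g x y (R + 1) C u =
        updRow (updBlock g x y R C u) (x + R) y C (u R) := by
      unfold updBlock
      rw [List.range_succ, List.foldl_append, List.foldl_cons, List.foldl_nil]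
    obtain ⟨hsh, hch⟩ := ih g x y C hg
    obtain ⟨hsh', hch'⟩ := updRow_char (u R) C (updBlock g x y R C u) (x + R) y hsh
    constructor
    · rw [hstep]; exact hsh'
    · intro a b ha hb
      rw [hstep, hch' a b ha hb]
      by_cases hhit : a = x + R ∧ y ≤ b ∧ b - y < C
      · rw [if_pos hhit, if_pos (by omega)]
        rw [hch a b ha hb, if_neg (by omega)]
        congr 1 <;> omega
      · rw [if_neg hhit, hch a b ha hb]
        by_cases hc : x ≤ a ∧ a - x < R ∧ y ≤ b ∧ b - y < C
        · rw [if_pos hc, if_pos (by omega)]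
        · rw [if_neg hc, if_neg (by omega)]

theorem shaped_zeros (n3 : Nat) :
    Shaped (List.replicate n3 (List.replicate n3 (0 : Int))) n3 := by
  refine ⟨by simp, fun a ha => ?_⟩
  rw [List.getD_eq_getElem?_getD, List.getElem?_replicate_of_lt (by simpa using ha)]
  simp

theorem getCell_zeros (n3 a b : Nat) :
    getCell (List.replicate n3 (List.replicate n3 (0 : Int))) a b = 0 := by
  unfold getCell
  simp only [List.getD_eq_getElem?_getD, List.getElem?_replicate]
  split_ifs <;> simp

-- two grids with the same rectangular shape and the same cells are equal
theorem grid_ext {R C : Nat} {g g' : List (List Int)}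
    (hl : g.length = R) (hl' : g'.length = R)
    (hr : ∀ r ∈ g, r.length = C) (hr' : ∀ r ∈ g', r.length = C)
    (h : ∀ a b, a < R → b < C → getCell g a b = getCell g' a b) : g = g' := by
  apply List.ext_getElem (by rw [hl, hl'])
  intro i h1 h2
  have hrow : g[i].length = C := hr _ (List.getElem_mem h1)
  have hrow' : g'[i].length = C := hr' _ (List.getElem_mem h2)
  apply List.ext_getElem (by rw [hrow, hrow'])
  intro j hj1 hj2
  have := h i j (by omega) (by omega)
  unfold getCell at this
  simp only [List.getD_eq_getElem?_getD] at this
  rw [List.getElem?_eq_getElem h1, List.getElem?_eq_getElem h2] at this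
  simp only [Option.getD_some] at this
  rw [List.getElem?_eq_getElem hj1, List.getElem?_eq_getElem hj2] at this
  simpa using this

-- a Shaped-grid version of grid_ext
theorem grid_ext_shaped {N : Nat} {g g' : List (List Int)}
    (hg : Shaped g N) (hg' : Shaped g' N)
    (h : ∀ a b, a < N → b < N → getCell g a b = getCell g' a b) : g = g' := by
  refine grid_ext hg.1 hg'.1 ?_ ?_ h
  · intro r hr
    obtain ⟨i, hi, rfl⟩ := List.getElem_of_mem hr
    have := hg.2 i (hg.1 ▸ hi)
    simp only [List.getD_eq_getElem?_getD] at this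
    rwa [List.getElem?_eq_getElem hi, Option.getD_some] at this
  · intro r hr
    obtain ⟨i, hi, rfl⟩ := List.getElem_of_mem hr
    have := hg'.2 i (hg'.1 ▸ hi)
    simp only [List.getD_eq_getElem?_getD] at this
    rwa [List.getElem?_eq_getElem hi, Option.getD_some] at this

-- the three nested loops of A are instances of updBlock
theorem addA_eq (x y : Nat) (g key : List (List Int)) (m : Nat) :
    addA x y g key m = updBlock g x y m m (fun i j v => v + getCell key i j) := rfl

theorem rollA_eq (x y : Nat) (g key : List (List Int)) (m : Nat) :
    rollA x y g key m = updBlock g x y m m (fun i j v => v - getCell key i j) := rfl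

theorem getLockA_eq (lock : List (List Int)) (n : Nat) :
    getLockA lock n =
      updBlock (List.replicate (3 * n) (List.replicate (3 * n) (0 : Int))) n n n n
        (fun i j _ => getCell lock i j) := by
  unfold getLockA updBlock updRow
  congr 1
  funext g i
  congr 1
  funext g j
  rw [Nat.add_comm i n, Nat.add_comm j n]

theorem getLockA_char (lock : List (List Int)) (n : Nat) :
    Shaped (getLockA lock n) (3 * n) ∧
    ∀ a b, a < 3 * n → b < 3 * n →
      getCell (getLockA lock n) a b =
        if n ≤ a ∧ a - n < n ∧ n ≤ b ∧ b - n < n then getCell lock (a - n) (b - n)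
        else 0 := by
  rw [getLockA_eq]
  obtain ⟨hsh, hch⟩ := updBlock_char (N := 3 * n) (fun i j _ => getCell lock i j) n
    (List.replicate (3 * n) (List.replicate (3 * n) (0 : Int))) n n n (shaped_zeros (3 * n))
  refine ⟨hsh, fun a b ha hb => ?_⟩
  rw [hch a b ha hb]
  split_ifs with h
  · rfl
  · exact getCell_zeros _ _ _

theorem all_congr_mem {α : Type} (l : List α) (f g : α → Bool)
    (h : ∀ a ∈ l, f a = g a) : l.all f = l.all g := by
  induction l with
  | nil => rfl
  | cons x xs ih => simp_all [List.all_cons]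

theorem unlock_eq (lock k' : List (List Int)) (n m x y : Nat) :
    unlockingA x y (getLockA lock n) k' n m = (getLockA lock n, chk lock k' n m x y) := by
  obtain ⟨hG0sh, hG0⟩ := getLockA_char lock n
  obtain ⟨hg1sh, hg1⟩ := updBlock_char (N := 3 * n) (fun i j v => v + getCell k' i j) m
    (getLockA lock n) x y m hG0sh
  have hroll : rollA x y (addA x y (getLockA lock n) k' m) k' m = getLockA lock n := by
    rw [addA_eq, rollA_eq]
    obtain ⟨hrsh, hr⟩ := updBlock_char (N := 3 * n) (fun i j v => v - getCell k' i j) m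
      (updBlock (getLockA lock n) x y m m fun i j v => v + getCell k' i j) x y m hg1sh
    apply grid_ext_shaped hrsh hG0sh
    intro a b ha hb
    rw [hr a b ha hb, hg1 a b ha hb]
    split_ifs with h
    · ring
    · rfl
  have hok : ((List.range n).all fun i => (List.range n).all fun j =>
      getCell (addA x y (getLockA lock n) k' m) (n + i) (n + j) == 1) =
      chk lock k' n m x y := by
    unfold chk
    apply all_congr_mem
    intro a hha
    simp only [List.mem_range] at hha
    apply all_congr_mem
    intro b hhb
    simp only [List.mem_range] at hhb
    have h3a : n + a < 3 * n := by omega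
    have h3b : n + b < 3 * n := by omega
    have hbase : getCell (getLockA lock n) (n + a) (n + b) = getCell lock a b := by
      rw [hG0 (n + a) (n + b) h3a h3b, if_pos (by omega)]
      congr 1 <;> omega
    rw [addA_eq, hg1 (n + a) (n + b) h3a h3b, hbase]
    unfold cellOk
    rw [Nat.add_comm a n, Nat.add_comm b n]
    split_ifs with h
    · rfl
    · rw [add_zero]
  show (rollA x y (addA x y (getLockA lock n) k' m) k' m,
      (List.range n).all fun i => (List.range n).all fun j =>
        getCell (addA x y (getLockA lock n) k' m) (n + i) (n + j) == 1) =
    (getLockA lock n, chk lock k' n m x y)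
  rw [hroll, hok]

theorem headD_eq_getD {l : List Int} (h : l ≠ []) : l.headD 0 = l.getD 0 0 := by
  cases l with
  | nil => exact absurd rfl h
  | cons x xs => rfl

theorem tail_getD (l : List Int) (i : Nat) : l.tail.getD i 0 = l.getD (i + 1) 0 := by
  cases l <;> rfl

theorem getD_map_tail (rows : List (List Int)) (j : Nat) :
    (rows.map (·.tail)).getD j [] = (rows.getD j []).tail := by
  rw [List.getD_eq_getElem?_getD, List.getD_eq_getElem?_getD, List.getElem?_map]
  cases rows[j]? <;> rfl

theorem getD_map_headD (rows : List (List Int)) (j : Nat) (h : j < rows.length) :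
    (rows.map (·.headD 0)).getD j 0 = (rows.getD j []).headD 0 := by
  rw [List.getD_eq_getElem?_getD, List.getD_eq_getElem?_getD, List.getElem?_map,
    List.getElem?_eq_getElem h]
  rfl

theorem tz_rect : ∀ (L : Nat) (rows : List (List Int)), (rows.headD []).length ≤ L →
    ∀ r ∈ transposeZip rows, r.length = rows.length := by
  intro L
  induction L with
  | zero =>
    intro rows hL r hr
    rw [transposeZip] at hr
    split at hr
    · simp at hr
    · rename_i h
      simp only [Bool.or_eq_true, List.isEmpty_iff, List.any_eq_true, not_or] at h
      exfalso
      cases rows with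
      | nil => exact h.1 rfl
      | cons r0 rest =>
        simp only [List.headD_cons] at hL
        exact h.2 ⟨r0, List.mem_cons_self,
          List.length_eq_zero_iff.mp (Nat.le_zero.mp hL)⟩
  | succ L ih =>
    intro rows hL r hr
    rw [transposeZip] at hr
    split at hr
    · simp at hr
    · rcases List.mem_cons.mp hr with h1 | h1
      · simp [h1]
      · have hlen : ((rows.map (·.tail)).headD []).length ≤ L := by
          cases rows with
          | nil => simp
          | cons r0 rest =>
            simp only [List.map_cons, List.headD_cons, List.length_tail]
            simp only [List.headD_cons] at hL
            omega
        have := ih (rows.map (·.tail)) hlen r h1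
        simpa using this

theorem tz_char : ∀ (C : Nat) (rows : List (List Int)),
    (∀ r ∈ rows, r.length = C) → rows ≠ [] →
    (transposeZip rows).length = C ∧
    ∀ i j, i < C → j < rows.length →
      getCell (transposeZip rows) i j = getCell rows j i := by
  intro C
  induction C with
  | zero =>
    intro rows hrect hne
    have hempty : transposeZip rows = [] := by
      rw [transposeZip]
      split
      · rfl
      · rename_i h
        exfalso
        simp only [Bool.or_eq_true, List.isEmpty_iff, List.any_eq_true, not_or] at h
        cases rows with
        | nil => exact hne rfl
        | cons r0 rest =>
          exact h.2 ⟨r0, List.mem_cons_self, List.length_eq_zero_iff.mp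
            (Nat.le_zero.mp (Nat.le_of_eq (hrect r0 List.mem_cons_self)))⟩
    exact ⟨by simp [hempty], fun i j hi _ => absurd hi (by omega)⟩
  | succ C ih =>
    intro rows hrect hne
    have hcond : ¬ ((rows.isEmpty || rows.any (·.isEmpty)) = true) := by
      simp only [Bool.or_eq_true, List.isEmpty_iff, List.any_eq_true, not_or]
      refine ⟨hne, ?_⟩
      rintro ⟨r0, hr0, he⟩
      have hl := hrect r0 hr0
      rw [he] at hl
      simp at hl
    have hstep : transposeZip rows =
        (rows.map (·.headD 0)) :: transposeZip (rows.map (·.tail)) := by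
      rw [transposeZip, dif_neg hcond]
    have htails : ∀ r ∈ rows.map (·.tail), r.length = C := by
      intro r hr
      obtain ⟨r0, hr0, rfl⟩ := List.mem_map.mp hr
      simp [List.length_tail, hrect r0 hr0]
    have htne : rows.map (·.tail) ≠ [] := by
      cases rows with
      | nil => exact absurd rfl hne
      | cons r0 rest => simp
    obtain ⟨ihlen, ihcell⟩ := ih (rows.map (·.tail)) htails htne
    refine ⟨by simp [hstep, ihlen], fun i j hi hj => ?_⟩
    rw [hstep]
    have hmem : rows.getD j [] ∈ rows := by
      rw [List.getD_eq_getElem?_getD, List.getElem?_eq_getElem hj]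
      simpa using List.getElem_mem hj
    cases i with
    | zero =>
      have hne0 : rows.getD j [] ≠ [] := by
        intro he
        have hl := hrect _ hmem
        rw [he] at hl
        simp at hl
      unfold getCell
      simp only [List.getD_cons_zero]
      rw [getD_map_headD rows j hj, headD_eq_getD hne0]
    | succ i =>
      unfold getCell
      simp only [List.getD_cons_succ]
      have hc := ihcell i j (by omega) (by simpa using hj)
      unfold getCell at hc
      rw [hc, getD_map_tail, tail_getD]

theorem rot_char (C : Nat) (g : List (List Int))
    (hrect : ∀ r ∈ g, r.length = C) (hne : g ≠ []) :
    (rotateK g).length = C ∧ (∀ r ∈ rotateK g, r.length = g.length) ∧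
    ∀ i j, i < C → j < g.length →
      getCell (rotateK g) i j = getCell g (g.length - 1 - j) i := by
  have hrev : ∀ r ∈ g.reverse, r.length = C := fun r hr =>
    hrect r (List.mem_reverse.mp hr)
  have hrevne : g.reverse ≠ [] := by simpa using hne
  obtain ⟨hlen, hcell⟩ := tz_char C g.reverse hrev hrevne
  refine ⟨by simpa [rotateK] using hlen, ?_, ?_⟩
  · intro r hr
    have := tz_rect ((g.reverse.headD []).length) g.reverse le_rfl r hr
    simpa [rotateK] using this
  · intro i j hi hj
    have := hcell i j hi (by simpa using hj)
    rw [rotateK, this]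
    have hrow : g.reverse.getD j ([] : List Int) = g.getD (g.length - 1 - j) [] := by
      rw [List.getD_eq_getElem?_getD, List.getElem?_reverse (by simpa using hj),
        ← List.getD_eq_getElem?_getD]
    unfold getCell
    rw [hrow]

theorem rot4_id (C : Nat) (h : List (List Int))
    (hrect : ∀ r ∈ h, r.length = C) (hne : h ≠ []) (hC : 0 < C) :
    rotateK (rotateK (rotateK (rotateK h))) = h := by
  have hR : 0 < h.length := List.length_pos_of_ne_nil hne
  obtain ⟨l1, r1, c1⟩ := rot_char C h hrect hne
  have hne1 : rotateK h ≠ [] := List.ne_nil_of_length_pos (by omega)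
  obtain ⟨l2, r2, c2⟩ := rot_char h.length (rotateK h) r1 hne1
  have hr2' : ∀ r ∈ rotateK (rotateK h), r.length = C := by
    intro r hr; rw [r2 r hr, l1]
  have hne2 : rotateK (rotateK h) ≠ [] := List.ne_nil_of_length_pos (by omega)
  obtain ⟨l3, r3, c3⟩ := rot_char C (rotateK (rotateK h)) hr2' hne2
  have hr3' : ∀ r ∈ rotateK (rotateK (rotateK h)), r.length = h.length := by
    intro r hr; rw [r3 r hr, l2]
  have hne3 : rotateK (rotateK (rotateK h)) ≠ [] := List.ne_nil_of_length_pos (by omega)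
  obtain ⟨l4, r4, c4⟩ := rot_char h.length (rotateK (rotateK (rotateK h))) hr3' hne3
  apply grid_ext (R := h.length) (C := C) l4 rfl
    (fun r hr => by rw [r4 r hr, l3]) hrect
  intro a b ha hb
  rw [c4 a b ha (by omega), l3]
  rw [c3 (C - 1 - b) a (by omega) (by omega), l2]
  rw [c2 (h.length - 1 - a) (C - 1 - b) (by omega) (by omega), l1]
  rw [c1 (C - 1 - (C - 1 - b)) (h.length - 1 - a) (by omega) (by omega)]
  congr 1 <;> omega

theorem rot_nil : rotateK [] = [] := by
  rw [rotateK, List.reverse_nil, transposeZip]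
  simp

theorem rot_period (k : List (List Int)) :
    rotateK (rotateK (rotateK (rotateK (rotateK k)))) = rotateK k := by
  by_cases h1 : rotateK k = []
  · rw [h1, rot_nil, rot_nil, rot_nil, rot_nil]
  · have hk : k ≠ [] := by
      intro he
      rw [he, rot_nil] at h1
      exact h1 rfl
    have hC : 0 < k.length := List.length_pos_of_ne_nil hk
    have hrect : ∀ r ∈ rotateK k, r.length = k.length := by
      intro r hr
      have := tz_rect ((k.reverse.headD []).length) k.reverse le_rfl r
        (by simpa [rotateK] using hr)
      simpa using this
    exact rot4_id k.length (rotateK k) hrect h1 hC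

theorem rotLoop4_eq (lock k : List (List Int)) (n m x y : Nat) :
    rotLoop 4 x y (getLockA lock n) k n m =
      (getLockA lock n,
        (if chk lock (rotateK k) n m x y then rotateK k
         else if chk lock (rotateK (rotateK k)) n m x y then rotateK (rotateK k)
         else if chk lock (rotateK (rotateK (rotateK k))) n m x y then
           rotateK (rotateK (rotateK k))
         else rotateK (rotateK (rotateK (rotateK k)))),
        (chk lock (rotateK k) n m x y ||
         chk lock (rotateK (rotateK k)) n m x y ||
         chk lock (rotateK (rotateK (rotateK k))) n m x y ||
         chk lock (rotateK (rotateK (rotateK (rotateK k)))) n m x y)) := by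
  show rotLoop (3 + 1) x y (getLockA lock n) k n m = _
  rw [rotLoop, unlock_eq]
  by_cases h1 : chk lock (rotateK k) n m x y
  · simp [h1]
  · simp only [Bool.not_eq_true] at h1
    simp only [h1, Bool.false_eq_true, if_false, Bool.false_or]
    show rotLoop (2 + 1) x y (getLockA lock n) (rotateK k) n m = _
    rw [rotLoop, unlock_eq]
    by_cases h2 : chk lock (rotateK (rotateK k)) n m x y
    · simp [h2]
    · simp only [Bool.not_eq_true] at h2
      simp only [h2, Bool.false_eq_true, if_false, Bool.false_or]
      show rotLoop (1 + 1) x y (getLockA lock n) (rotateK (rotateK k)) n m = _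
      rw [rotLoop, unlock_eq]
      by_cases h3 : chk lock (rotateK (rotateK (rotateK k))) n m x y
      · simp [h3]
      · simp only [Bool.not_eq_true] at h3
        simp only [h3, Bool.false_eq_true, if_false, Bool.false_or]
        show rotLoop (0 + 1) x y (getLockA lock n)
          (rotateK (rotateK (rotateK k))) n m = _
        rw [rotLoop, unlock_eq]
        by_cases h4 : chk lock (rotateK (rotateK (rotateK (rotateK k)))) n m x y
        · simp [h4]
        · simp only [Bool.not_eq_true] at h4
          simp only [h4, Bool.false_eq_true, if_false]
          rw [rotLoop]

theorem mainLoop_eq (lock key0 : List (List Int)) (n m : Nat) :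
    ∀ (offs : List (Nat × Nat)) (k : List (List Int)),
      rotateK k = rotateK key0 →
      mainLoopA offs (getLockA lock n) k n m =
        offs.any (fun p =>
          [rotateK key0, rotateK (rotateK key0), rotateK (rotateK (rotateK key0)),
            rotateK (rotateK (rotateK (rotateK key0)))].any fun r =>
              chk lock r n m p.1 p.2) := by
  intro offs
  induction offs with
  | nil => intro k _; rfl
  | cons p rest ih =>
    intro k hk
    obtain ⟨x, y⟩ := p
    rw [List.any_cons]
    show (let r := rotLoop 4 x y (getLockA lock n) k n m;
      if r.2.2 then true else mainLoopA rest r.1 r.2.1 n m) = _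
    rw [rotLoop4_eq, hk]
    by_cases hc : (chk lock (rotateK key0) n m x y ||
        chk lock (rotateK (rotateK key0)) n m x y ||
        chk lock (rotateK (rotateK (rotateK key0))) n m x y ||
        chk lock (rotateK (rotateK (rotateK (rotateK key0)))) n m x y) = true
    · rw [if_pos hc]
      simp only [List.any_cons, List.any_nil]
      simp only [Bool.or_eq_true] at hc
      rcases hc with ((h | h) | h) | h <;> simp [h]
    · simp only [Bool.or_eq_true, not_or, Bool.not_eq_true] at hc
      obtain ⟨⟨⟨h1, h2⟩, h3⟩, h4⟩ := hc
      simp only [h1, h2, h3, h4, Bool.false_eq_true, if_false, Bool.or_false,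
        List.any_cons, List.any_nil, Bool.false_or]
      rw [ih _ (rot_period key0)]
      simp [List.any_cons]

theorem any_congr_mem {α : Type} (l : List α) (f g : α → Bool)
    (h : ∀ a ∈ l, f a = g a) : l.any f = l.any g := by
  induction l with
  | nil => rfl
  | cons x xs ih => simp_all [List.any_cons]

-- B-side: the candidate loop is a filter by the conjunction of all remaining cells
theorem candLoop_eq (lock r : List (List Int)) (n m : Nat) :
    ∀ (cs cand : List (Nat × Nat)),
      candLoop lock r n m cs cand =
        cand.filter fun p => cs.all fun c => cellOk lock r n m p.1 p.2 c.1 c.2 := by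
  intro cs
  induction cs with
  | nil => intro cand; simp [candLoop]
  | cons c cs ih =>
    intro cand
    show (let cand' := cand.filter fun p => cellOk lock r n m p.1 p.2 c.1 c.2;
      if cand'.isEmpty then cand' else candLoop lock r n m cs cand') = _
    simp only
    by_cases he : (cand.filter fun p => cellOk lock r n m p.1 p.2 c.1 c.2).isEmpty = true
    · rw [if_pos he]
      rw [List.isEmpty_iff] at he
      rw [he]
      symm
      rw [List.filter_eq_nil_iff]
      intro p hp
      simp only [List.all_cons, Bool.and_eq_true, not_and]
      intro hcell _
      have : p ∈ cand.filter fun p => cellOk lock r n m p.1 p.2 c.1 c.2 :=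
        List.mem_filter.mpr ⟨hp, hcell⟩
      rw [he] at this
      simp at this
    · rw [if_neg he, ih, List.filter_filter]
      apply List.filter_congr
      intro p _
      simp only [List.all_cons]
      rw [Bool.and_comm]

theorem not_isEmpty_filter {α : Type} (l : List α) (p : α → Bool) :
    (!(l.filter p).isEmpty) = l.any p := by
  induction l with
  | nil => rfl
  | cons x xs ih => by_cases h : p x <;> simp [h, ih]

theorem cellsB_all (lock r : List (List Int)) (n m i j : Nat) :
    ((cellsB n).all fun c => cellOk lock r n m i j c.1 c.2) = chk lock r n m i j := by
  unfold cellsB chk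
  rw [List.all_flatMap]
  apply all_congr_mem
  intro a _
  rw [List.all_map]
  rfl

theorem any_or_distrib {α : Type} (l : List α) (f g : α → Bool) :
    (l.any fun a => f a || g a) = (l.any f || l.any g) := by
  induction l with
  | nil => rfl
  | cons x xs ih =>
    simp only [List.any_cons, ih]
    cases f x <;> cases g x <;> cases xs.any f <;> cases xs.any g <;> rfl

theorem any_swap {α β : Type} (l1 : List α) (l2 : List β) (f : α → β → Bool) :
    (l1.any fun a => l2.any fun b => f a b) = (l2.any fun b => l1.any fun a => f a b) := by
  induction l1 with
  | nil => simp
  | cons x xs ih =>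
    simp only [List.any_cons, ih]
    exact (any_or_distrib l2 _ _).symm

-- ===== VERDICT (by name: the statement is the Claim_ definition above) =====
theorem solution_spec : Claim_equal_solution := by
  intro key lock _ _
  show solution key lock = solution_alt key lock
  unfold solution solution_alt
  rw [mainLoop_eq lock key lock.length key.length (offsetsA lock.length) key rfl]
  rw [any_swap]
  apply any_congr_mem
  intro r _
  rw [candLoop_eq, not_isEmpty_filter]
  show _ = (offsetsA lock.length).any _
  apply any_congr_mem
  intro p _
  rw [cellsB_all]
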